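-- pv_equiv track=rewrite | github.com/DreamOfTheRedChamber/leetcode | company-specific/anagram.py | findKAnagrams
-- ===== SOURCE A (Python) =====
-- import collections
--
-- def findKAnagrams(name, inputList, k):
--     result = []
--     for index, toCompare in enumerate(inputList):
--
--         if len(toCompare) != len(name):
--             continue
--
--         count = 0
--         nameDict = collections.Counter(name)
--         for i in range(len(toCompare)):
--             if toCompare[i] in nameDict:
--                 if nameDict[toCompare[i]] > 0:
--                     nameDict[toCompare[i]] -= 1
--                 else:
--                     count += 1
--             else:
--                 count += 1
--
--         if count <= k:
--             result.append(toCompare)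
--
--     return result
-- ===== SOURCE B (Python) =====
-- import collections
--
-- def findKAnagrams(name, inputList, k):
--     nameDict = collections.Counter(name)
--     result = []
--     for word in inputList:
--         if len(word) != len(name):
--             continue
--         shared = sum(min(nameDict[c], cnt) for c, cnt in collections.Counter(word).items())
--         if len(word) - shared <= k:
--             result.append(word)
--     return result
-- ===== Notes on version B (the rewrite author's own statement) =====
-- stated objective: simpler
-- what changed: B builds Counter(name) once outside the loop and computes mismatches arithmetically as len(word) minus the multiset-intersection size (sum of per-character min counts over the word's distinct characters), replacing A's positional scan that mutates a fresh per-word counter and counts greedy failures.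
import Mathlib
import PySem

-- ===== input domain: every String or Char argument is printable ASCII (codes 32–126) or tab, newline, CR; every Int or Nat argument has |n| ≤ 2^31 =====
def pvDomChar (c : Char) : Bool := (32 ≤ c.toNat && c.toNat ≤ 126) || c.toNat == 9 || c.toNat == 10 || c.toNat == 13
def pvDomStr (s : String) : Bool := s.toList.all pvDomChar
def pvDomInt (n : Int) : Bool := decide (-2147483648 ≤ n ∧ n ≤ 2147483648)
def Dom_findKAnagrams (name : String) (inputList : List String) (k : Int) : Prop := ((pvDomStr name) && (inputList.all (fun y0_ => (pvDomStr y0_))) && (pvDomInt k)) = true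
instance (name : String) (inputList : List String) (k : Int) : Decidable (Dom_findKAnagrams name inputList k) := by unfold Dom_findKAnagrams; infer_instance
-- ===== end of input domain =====

-- B builds Counter(name) once and counts mismatches as len(word) - Σ_c min(name count, word count); simpler arithmetic form, same results.

-- ===== PORT A =====
def findKAnagrams (name : String) (inputList : List String) (k : Int) : List String :=
  inputList.foldl (fun result toCompare =>
    if PySem.Str.len toCompare ≠ PySem.Str.len name then result
    else
      let st := (PySem.List.pyRange 0 (PySem.Str.len toCompare)).foldl
        (fun (st : PySem.Dict Char Int × Int) i =>
          -- toCompare[i] = pyGetD …; the index from range(len) is always in range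
          if st.1.contains (PySem.List.pyGetD toCompare.toList i ' ') then
            if st.1.getD (PySem.List.pyGetD toCompare.toList i ' ') 0 > 0 then
              (st.1.modify (PySem.List.pyGetD toCompare.toList i ' ') 0 (· - 1), st.2)
            else (st.1, st.2 + 1)
          else (st.1, st.2 + 1))
        (PySem.Dict.counter name.toList, 0)
      if st.2 ≤ k then result ++ [toCompare] else result) []

-- ===== PORT B =====
def findKAnagrams_alt (name : String) (inputList : List String) (k : Int) : List String :=
  let nameDict := PySem.Dict.counter name.toList
  inputList.foldl (fun result word =>
    if PySem.Str.len word ≠ PySem.Str.len name then result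
    else
      let shared := ((PySem.Dict.counter word.toList).items.map
        (fun p => min (nameDict.getD p.1 0) p.2)).sum
      if PySem.Str.len word - shared ≤ k then result ++ [word] else result) []

-- ===== PRECONDITION & SPEC =====
def Spec_findKAnagrams (name : String) (inputList : List String) (k : Int) (out : List String) : Prop := out = findKAnagrams_alt name inputList k
instance (name : String) (inputList : List String) (k : Int) (out : List String) : Decidable (Spec_findKAnagrams name inputList k out) := by unfold Spec_findKAnagrams; infer_instance

-- ===== CLAIM (what is proved, stated in full; the proofs are below) =====
def Claim_equal_findKAnagrams : Prop := ∀ (name : String) (inputList : List String) (k : Int), Dom_findKAnagrams name inputList k → Spec_findKAnagrams name inputList k (findKAnagrams name inputList k)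

-- ===== LEMMAS AND PROOFS =====

-- Abstract form of A's greedy per-word mismatch count: r gives the remaining budget per character.
def pvGreedy : List Char → (Char → Int) → Int
  | [], _ => 0
  | c :: cs, r =>
    if r c > 0 then pvGreedy cs (Function.update r c (r c - 1)) else 1 + pvGreedy cs r

lemma pv_foldA_eq (cs : List Char) : ∀ (d : PySem.Dict Char Int) (acc : Int),
    (∀ c, 0 ≤ d.getD c 0) →
    (cs.foldl (fun (st : PySem.Dict Char Int × Int) c =>
        if st.1.contains c then
          if st.1.getD c 0 > 0 then (st.1.modify c 0 (· - 1), st.2)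
          else (st.1, st.2 + 1)
        else (st.1, st.2 + 1)) (d, acc)).2
      = acc + pvGreedy cs (fun c => d.getD c 0) := by
  induction cs with
  | nil => intro d acc _; simp [pvGreedy]
  | cons c cs ih =>
    intro d acc hnn
    by_cases hc : d.contains c = true
    · by_cases hpos : d.getD c 0 > 0
      · have hupd : (fun x => (d.modify c 0 (· - 1)).getD x 0)
            = Function.update (fun x => d.getD x 0) c (d.getD c 0 - 1) := by
          funext x
          rw [PySem.Dict.getD_modify, Function.update_apply]
        simp only [List.foldl_cons, hc, if_pos hpos, if_true]
        rw [ih _ acc (by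
          intro x
          rw [PySem.Dict.getD_modify]
          split_ifs with hx
          · subst hx; omega
          · exact hnn x)]
        simp [pvGreedy, hpos, hupd]
      · simp only [List.foldl_cons, hc, if_neg hpos, if_true]
        rw [ih _ (acc + 1) hnn]
        simp [pvGreedy, hpos]
        ring
    · have hc' : d.contains c = false := by simpa using hc
      have h0 : d.getD c 0 = 0 := PySem.Dict.getD_of_not_contains d 0 hc'
      simp only [List.foldl_cons, hc']
      rw [if_neg (by simp), ih _ (acc + 1) hnn]
      simp [pvGreedy, h0]
      ring

-- sum over a nodup list of two functions differing only at one member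
lemma pv_sum_map_sub_single {c : Char} {f g : Char → Int} :
    ∀ L : List Char, L.Nodup → c ∈ L → (∀ x ∈ L, x ≠ c → f x = g x) →
    (L.map f).sum = (L.map g).sum + (f c - g c) := by
  intro L
  induction L with
  | nil => intro _ h; cases h
  | cons a L ih =>
    intro hnd hm hfg
    rcases List.mem_cons.mp hm with rfl | hmem
    · have : L.map f = L.map g := by
        apply List.map_congr_left
        intro x hx
        exact hfg x (List.mem_cons_of_mem _ hx) (fun h => (List.nodup_cons.mp hnd).1 (h ▸ hx))
      simp [this]; ring
    · have ha : f a = g a :=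
        hfg a (List.mem_cons_self) (fun h => (List.nodup_cons.mp hnd).1 (h ▸ hmem))
      simp only [List.map_cons, List.sum_cons, ha,
        ih (List.nodup_cons.mp hnd).2 hmem (fun x hx => hfg x (List.mem_cons_of_mem _ hx))]
      ring

lemma pv_greedy_closed : ∀ (cs : List Char) (r : Char → Int) (L : List Char),
    (∀ c, 0 ≤ r c) → L.Nodup → (∀ c ∈ cs, c ∈ L) →
    pvGreedy cs r = (cs.length : Int) - (L.map (fun c => min (r c) ((cs.count c : Int)))).sum := by
  intro cs
  induction cs with
  | nil =>
    intro r L hr _ _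
    have hz : (L.map (fun c => min (r c) (((List.count c ([] : List Char)) : Int)))).sum = 0 := by
      apply List.sum_eq_zero
      intro x hx
      rcases List.mem_map.mp hx with ⟨c, _, rfl⟩
      simp [min_eq_right (hr c)]
    simp only [pvGreedy, hz, List.length_nil]
    simp
  | cons c cs ih =>
    intro r L hr hnd hsub
    have hcL : c ∈ L := hsub c List.mem_cons_self
    have hcount : ∀ x : Char, List.count x (c :: cs) = List.count x cs + (if c = x then 1 else 0) := by
      intro x
      rw [List.count_cons]
      simp
    have hlen : (((c :: cs).length : Int)) = (cs.length : Int) + 1 := by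
      push_cast [List.length_cons]; ring
    by_cases hpos : r c > 0
    · set r' := Function.update r c (r c - 1) with hr'
      have hr'nn : ∀ x, 0 ≤ r' x := by
        intro x; rw [hr', Function.update_apply]
        split_ifs with hx
        · omega
        · exact hr x
      have hsum := pv_sum_map_sub_single (c := c)
        (f := fun x => min (r x) (((c :: cs).count x : Int)))
        (g := fun x => min (r' x) ((cs.count x : Int)))
        L hnd hcL (by
          intro x _ hxc
          simp only [hcount x, if_neg (fun h : c = x => hxc h.symm), Nat.add_zero, hr',
            Function.update_apply, if_neg hxc])
      have hterm : min (r c) ((List.count c (c :: cs) : Int)) - min (r' c) ((List.count c cs : Int)) = 1 := by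
        simp only [hcount c, hr', Function.update_self]
        push_cast
        omega
      have hIH := ih r' L hr'nn hnd (fun x hx => hsub x (List.mem_cons_of_mem _ hx))
      simp only [pvGreedy, if_pos hpos, ← hr']
      rw [hIH, hlen]
      simp only [] at hsum
      linarith [hsum, hterm]
    · have h0 : r c = 0 := le_antisymm (by omega) (hr c)
      have hsum := pv_sum_map_sub_single (c := c)
        (f := fun x => min (r x) (((c :: cs).count x : Int)))
        (g := fun x => min (r x) ((cs.count x : Int)))
        L hnd hcL (by
          intro x _ hxc
          simp only [hcount x, if_neg (fun h : c = x => hxc h.symm), Nat.add_zero])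
      have hterm : min (r c) ((List.count c (c :: cs) : Int)) - min (r c) ((List.count c cs : Int)) = 0 := by
        simp only [hcount c, h0]
        push_cast
        omega
      have hIH := ih r L hr hnd (fun x hx => hsub x (List.mem_cons_of_mem _ hx))
      simp only [pvGreedy, if_neg hpos]
      rw [hIH, hlen]
      simp only [] at hsum
      linarith [hsum, hterm]

-- A's per-word count equals word length minus B's shared sum
lemma pv_perWord (name w : String) :
    ((PySem.List.pyRange 0 (PySem.Str.len w)).foldl
        (fun (st : PySem.Dict Char Int × Int) i =>
          if st.1.contains (PySem.List.pyGetD w.toList i ' ') then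
            if st.1.getD (PySem.List.pyGetD w.toList i ' ') 0 > 0 then
              (st.1.modify (PySem.List.pyGetD w.toList i ' ') 0 (· - 1), st.2)
            else (st.1, st.2 + 1)
          else (st.1, st.2 + 1))
        (PySem.Dict.counter name.toList, 0)).2
    = PySem.Str.len w -
        (((PySem.Dict.counter w.toList).items.map
          (fun p => min ((PySem.Dict.counter name.toList).getD p.1 0) p.2)).sum) := by
  rw [PySem.Str.len_eq]
  rw [PySem.List.foldl_pyRange_pyGetD' w.toList ' '
    (fun (st : PySem.Dict Char Int × Int) c =>
      if st.1.contains c then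
        if st.1.getD c 0 > 0 then (st.1.modify c 0 (· - 1), st.2)
        else (st.1, st.2 + 1)
      else (st.1, st.2 + 1))
    (PySem.Dict.counter name.toList, 0) (le_refl 0)]
  simp only [Int.toNat_zero, List.drop_zero]
  rw [pv_foldA_eq w.toList (PySem.Dict.counter name.toList) 0
    (by intro c; rw [PySem.Dict.getD_counter]; positivity)]
  rw [pv_greedy_closed w.toList _ (PySem.Set.ofList w.toList)
    (by intro c; rw [PySem.Dict.getD_counter]; positivity)
    (PySem.Set.nodup_ofList w.toList)
    (by intro c hc; exact (PySem.Set.mem_ofList w.toList c).mpr hc)]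
  rw [PySem.Dict.items_counter, List.map_map]
  simp [Function.comp_def, PySem.Dict.getD_counter]

-- ===== VERDICT (by name: the statement is the Claim_ definition above) =====
theorem findKAnagrams_spec : Claim_equal_findKAnagrams := by
  intro name inputList k _
  unfold Spec_findKAnagrams
  show findKAnagrams name inputList k = findKAnagrams_alt name inputList k
  simp only [findKAnagrams, findKAnagrams_alt]
  congr 1
  funext result w
  by_cases hlen : PySem.Str.len w ≠ PySem.Str.len name
  · rw [if_pos hlen, if_pos hlen]
  · rw [if_neg hlen, if_neg hlen, pv_perWord name w]
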